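-- pv_equiv track=rewrite | github.com/mcpirate17/Lumen | server/context.py | filter_news_context
-- ===== SOURCE A (Python) =====
-- def filter_news_context(query: str, full_text: str) -> str:
--     """Filter news to top 5 most relevant items."""
--     # News is already aggregated — just limit to top 5 items
--     lines = full_text.split('\n')
--     result = []
--     item_count = 0
--     for line in lines:
--         if line.startswith('[') and ']' in line:
--             item_count += 1
--             if item_count > 5:
--                 break
--         result.append(line)
--     return '\n'.join(result)
-- ===== SOURCE B (Python) =====
-- def filter_news_context(query: str, full_text: str) -> str:
--     """Filter news to top 5 most relevant items."""
--     lines = full_text.split('\n')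
--     marks = [i for i, line in enumerate(lines) if line.startswith('[') and ']' in line]
--     cut = marks[5] if len(marks) > 5 else len(lines)
--     return '\n'.join(lines[:cut])
-- ===== Notes on version B (the rewrite author's own statement) =====
-- stated objective: idiomatic
-- what changed: Replaces the append-with-early-break counting loop by a locate-then-slice decomposition: build the list of marker-line indices once, then cut the line list at the 6th marker index (or keep it all) with a single slice.
import Mathlib
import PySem

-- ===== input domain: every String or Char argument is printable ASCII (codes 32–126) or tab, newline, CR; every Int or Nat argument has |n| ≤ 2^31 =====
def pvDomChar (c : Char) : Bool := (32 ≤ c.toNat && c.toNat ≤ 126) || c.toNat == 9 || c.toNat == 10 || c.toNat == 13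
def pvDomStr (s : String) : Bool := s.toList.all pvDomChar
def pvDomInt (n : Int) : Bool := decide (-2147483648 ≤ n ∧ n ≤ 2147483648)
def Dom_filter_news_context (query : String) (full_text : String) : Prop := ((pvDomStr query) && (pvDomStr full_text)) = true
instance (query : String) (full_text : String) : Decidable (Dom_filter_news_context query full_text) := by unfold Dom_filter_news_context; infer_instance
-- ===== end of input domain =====

-- B replaces A's append-with-early-break counting loop by a locate-then-slice decomposition
-- (collect the marker-line indices once, then cut the line list at the 6th one with a single
-- slice); objective: idiomatic, same cost.
-- In both ports, full_text.split('\n') is ported as (PySem.Str.split? full_text "\n").getD []: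
-- split? is exact and returns none only for an empty separator, which "\n" is not.

-- ===== PORT A =====
-- literal port of A's loop: append each line, break (before appending) at the 6th marker line
def pvLoopA : List String → Int → List String
  | [], _ => []
  | line :: ls, c =>
    if PySem.Str.startswith line "[" && PySem.Str.isIn "]" line then
      if c + 1 > 5 then []
      else line :: pvLoopA ls (c + 1)
    else line :: pvLoopA ls c

def filter_news_context (query : String) (full_text : String) : String :=
  PySem.Str.join "\n" (pvLoopA ((PySem.Str.split? full_text "\n").getD []) 0)

-- ===== PORT B =====
-- marks = [i for i, line in enumerate(lines) if line.startswith('[') and ']' in line]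
def pvMarksB (lines : List String) : List (Int × String) :=
  (PySem.List.enumerate lines 0).filter
    (fun p => PySem.Str.startswith p.2 "[" && PySem.Str.isIn "]" p.2)

-- cut = marks[5] if len(marks) > 5 else len(lines)
def pvCutB (lines : List String) : Int :=
  if 5 < (pvMarksB lines).length then (PySem.List.pyGetD (pvMarksB lines) 5 (0, "")).1
  else (lines.length : Int)

def filter_news_context_alt (query : String) (full_text : String) : String :=
  PySem.Str.join "\n"
    (PySem.List.slice ((PySem.Str.split? full_text "\n").getD []) none
      (some (pvCutB ((PySem.Str.split? full_text "\n").getD []))))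

-- ===== PRECONDITION & SPEC =====
def Spec_filter_news_context (query : String) (full_text : String) (out : String) : Prop := out = filter_news_context_alt query full_text
instance (query : String) (full_text : String) (out : String) : Decidable (Spec_filter_news_context query full_text out) := by unfold Spec_filter_news_context; infer_instance

-- ===== CLAIM (what is proved, stated in full; the proofs are below) =====
def Claim_equal_filter_news_context : Prop := ∀ (query : String) (full_text : String), Dom_filter_news_context query full_text → Spec_filter_news_context query full_text (filter_news_context query full_text)

-- ===== LEMMAS AND PROOFS =====

-- index of the (n+1)-th marker line, or the length of the list if there are at most n markers
def pvCutN : List String → Nat → Nat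
  | [], _ => 0
  | l :: ls, 0 =>
    if PySem.Str.startswith l "[" && PySem.Str.isIn "]" l then 0 else pvCutN ls 0 + 1
  | l :: ls, n + 1 =>
    if PySem.Str.startswith l "[" && PySem.Str.isIn "]" l then pvCutN ls n + 1
    else pvCutN ls (n + 1) + 1

theorem pvCutN_le (ls : List String) (n : Nat) : pvCutN ls n ≤ ls.length := by
  induction ls generalizing n with
  | nil => simp [pvCutN]
  | cons l ls ih =>
    cases n with
    | zero =>
      simp only [pvCutN, List.length_cons]
      split
      · omega
      · have := ih 0; omega
    | succ m =>
      simp only [pvCutN, List.length_cons]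
      split
      · have := ih m; omega
      · have := ih (m + 1); omega

theorem pvLoopA_eq_take (ls : List String) (c : Int) (h0 : 0 ≤ c) (h5 : c ≤ 5) :
    pvLoopA ls c = ls.take (pvCutN ls (5 - c).toNat) := by
  induction ls generalizing c with
  | nil => simp [pvLoopA]
  | cons l ls ih =>
    cases hm : (PySem.Str.startswith l "[" && PySem.Str.isIn "]" l) with
    | true =>
      obtain ⟨h1, h2⟩ : PySem.Chars.startswith l.toList ['['] = true ∧
          PySem.Chars.isIn [']'] l.toList = true := by simpa using hm
      by_cases hc : c + 1 > 5
      · have h50 : (5 - c).toNat = 0 := by omega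
        simp [pvLoopA, pvCutN, h1, h2, hc, h50]
      · obtain ⟨m, hmEq⟩ : ∃ m, (5 - c).toNat = m + 1 := ⟨(5 - (c + 1)).toNat, by omega⟩
        have hm'' : (5 - (c + 1)).toNat = m := by omega
        have hrec := ih (c + 1) (by omega) (by omega)
        rw [hm''] at hrec
        simp [pvLoopA, pvCutN, h1, h2, hc, hmEq, hrec]
    | false =>
      have hm' : ¬ (PySem.Chars.startswith l.toList ['['] = true ∧
          PySem.Chars.isIn [']'] l.toList = true) := by simpa using hm
      have hrec := ih c h0 h5
      cases hn : (5 - c).toNat with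
      | zero => rw [hn] at hrec; simp [pvLoopA, pvCutN, hm', hrec]
      | succ m => rw [hn] at hrec; simp [pvLoopA, pvCutN, hm', hrec]

theorem pvMarksB_getElem? (ls : List String) (s : Int) (n : Nat) :
    (((PySem.List.enumerate ls s).filter
        (fun p => PySem.Str.startswith p.2 "[" && PySem.Str.isIn "]" p.2))[n]?).map Prod.fst
      = if pvCutN ls n < ls.length then some (s + pvCutN ls n) else none := by
  induction ls generalizing s n with
  | nil => simp [PySem.List.enumerate_nil, pvCutN]
  | cons l ls ih =>
    rw [PySem.List.enumerate_cons, List.filter_cons]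
    cases hm : (PySem.Str.startswith l "[" && PySem.Str.isIn "]" l) with
    | true =>
      obtain ⟨h1, h2⟩ : PySem.Chars.startswith l.toList ['['] = true ∧
          PySem.Chars.isIn [']'] l.toList = true := by simpa using hm
      rw [if_pos rfl]
      cases n with
      | zero => simp [pvCutN, h1, h2]
      | succ m =>
        have hrec := ih (s + 1) m
        have hpc : pvCutN (l :: ls) (m + 1) = pvCutN ls m + 1 := by simp [pvCutN, h1, h2]
        rw [List.getElem?_cons_succ, hrec, hpc, List.length_cons]
        by_cases hlt : pvCutN ls m < ls.length
        · rw [if_pos hlt, if_pos (by omega : pvCutN ls m + 1 < ls.length + 1)]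
          congr 1
          push_cast
          ring
        · rw [if_neg hlt, if_neg (by omega : ¬ pvCutN ls m + 1 < ls.length + 1)]
    | false =>
      have hm' : ¬ (PySem.Chars.startswith l.toList ['['] = true ∧
          PySem.Chars.isIn [']'] l.toList = true) := by simpa using hm
      have hrec := ih (s + 1) n
      have hcut : pvCutN (l :: ls) n = pvCutN ls n + 1 := by
        cases n <;> simp [pvCutN, hm']
      rw [if_neg (by simp), hrec, hcut, List.length_cons]
      by_cases hlt : pvCutN ls n < ls.length
      · rw [if_pos hlt, if_pos (by omega : pvCutN ls n + 1 < ls.length + 1)]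
        congr 1
        push_cast
        ring
      · rw [if_neg hlt, if_neg (by omega : ¬ pvCutN ls n + 1 < ls.length + 1)]

-- ===== VERDICT (by name: the statement is the Claim_ definition above) =====
theorem filter_news_context_spec : Claim_equal_filter_news_context := by
  intro query full_text _
  unfold Spec_filter_news_context filter_news_context filter_news_context_alt
  set L := (PySem.Str.split? full_text "\n").getD [] with hL
  have hA : pvLoopA L 0 = L.take (pvCutN L 5) := by
    have := pvLoopA_eq_take L 0 (by omega) (by omega)
    simpa using this
  have hmk := pvMarksB_getElem? L 0 5
  rw [show ((PySem.List.enumerate L 0).filter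
      (fun p => PySem.Str.startswith p.2 "[" && PySem.Str.isIn "]" p.2)) = pvMarksB L from rfl] at hmk
  unfold pvCutB
  by_cases h : 5 < (pvMarksB L).length
  · -- the 6th marker line exists: B cuts exactly where A's loop breaks
    obtain ⟨p, hp⟩ : ∃ p, (pvMarksB L)[5]? = some p :=
      ⟨(pvMarksB L)[5], List.getElem?_eq_getElem h⟩
    rw [hp] at hmk
    have hclt : pvCutN L 5 < L.length := by
      by_contra hc
      simp [hc] at hmk
    rw [if_pos hclt, Option.map_some] at hmk
    have hget : PySem.List.pyGetD (pvMarksB L) 5 (0, "") = p := by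
      rw [PySem.List.pyGetD_ofNat']
      simp [List.getD_eq_getElem?_getD, hp]
    have hp1 : p.1 = (pvCutN L 5 : Int) := by
      have := congrArg (Option.getD · 0) hmk
      simpa using this
    rw [if_pos h, hget, hp1, PySem.List.slice_to_natCast, hA]
  · -- at most 5 marker lines: B keeps every line, as A's loop never breaks
    have hM5 : (pvMarksB L)[5]? = none := by
      rw [List.getElem?_eq_none_iff]
      omega
    rw [hM5] at hmk
    have hcl : pvCutN L 5 = L.length := by
      have hle := pvCutN_le L 5
      by_cases hlt : pvCutN L 5 < L.length
      · simp [hlt] at hmk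
      · omega
    rw [if_neg h, PySem.List.slice_to_natCast, hA, hcl, List.take_length]
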